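-- pv_equiv track=rewrite | github.com/Andrew-jiabin/Photoacoustic-Microscopy | Alazar_imaging/Alazar_imaging_tools.py | get_expected_trajectory
-- ===== SOURCE A (Python) =====
-- def get_expected_trajectory(SCAN_W, SCAN_H, STEP_UM, START_X, START_Y):
--
--     expected_trajectory_str = []
--     for j in range(SCAN_H):
--         curr_y = START_Y + j * STEP_UM
--
--         # 偶数行 (0, 2, 4...) X 增加；奇数行 (1, 3, 5...) X 减小
--         if j % 2 == 0:
--             x_range = range(START_X, START_X + SCAN_W)
--         else:
--             x_range = range(START_X + SCAN_W - 1, START_X - 1, -1)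
--
--         for curr_x in x_range:
--             # 严格匹配位移台返回格式: "X,Y,0"
--             # 注意：这里要确保负号和空格与硬件返回完全一致
--             target_s = f"{curr_x},{curr_y},0"
--             expected_trajectory_str.append(target_s)
--
--     return expected_trajectory_str
-- ===== SOURCE B (Python) =====
-- def get_expected_trajectory(SCAN_W, SCAN_H, STEP_UM, START_X, START_Y):
--     w = max(SCAN_W, 0)
--     h = max(SCAN_H, 0)
--     out = []
--     for i in range(w * h):
--         j, k = divmod(i, w)
--         x = START_X + (k if j % 2 == 0 else w - 1 - k)
--         out.append(f"{x},{START_Y + j * STEP_UM},0")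
--     return out
-- ===== Notes on version B (the rewrite author's own statement) =====
-- stated objective: alternative
-- what changed: B replaces A's nested row/column loops with a single flat loop over all SCAN_W*SCAN_H cell indices, recovering the row and the serpentine x offset from each index by divmod arithmetic.
import Mathlib
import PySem

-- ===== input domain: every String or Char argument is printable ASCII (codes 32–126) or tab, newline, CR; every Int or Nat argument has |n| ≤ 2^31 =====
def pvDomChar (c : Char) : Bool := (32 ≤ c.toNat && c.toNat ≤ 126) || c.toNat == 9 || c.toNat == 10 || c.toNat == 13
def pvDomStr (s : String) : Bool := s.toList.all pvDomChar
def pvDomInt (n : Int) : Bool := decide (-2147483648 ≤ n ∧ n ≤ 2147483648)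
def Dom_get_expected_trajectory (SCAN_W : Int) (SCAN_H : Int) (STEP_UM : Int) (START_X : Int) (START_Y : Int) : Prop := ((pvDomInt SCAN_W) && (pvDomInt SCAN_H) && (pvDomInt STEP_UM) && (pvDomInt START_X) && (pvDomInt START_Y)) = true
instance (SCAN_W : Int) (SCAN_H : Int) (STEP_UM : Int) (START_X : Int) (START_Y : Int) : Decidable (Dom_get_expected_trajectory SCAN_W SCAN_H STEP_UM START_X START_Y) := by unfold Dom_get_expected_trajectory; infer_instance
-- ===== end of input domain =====

-- B replaces A's nested row/column loops with one flat loop over all cell indices, recovering row and serpentine x offset by divmod (alternative decomposition, same cost).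


-- ===== PORT A =====
-- nested loops: per row, an ascending or descending x range, appended into one accumulator
def get_expected_trajectory (SCAN_W : Int) (SCAN_H : Int) (STEP_UM : Int) (START_X : Int) (START_Y : Int) : List String :=
  (PySem.List.pyRange 0 SCAN_H 1).foldl
    (fun acc j =>
      let curr_y := START_Y + j * STEP_UM
      let x_range :=
        if PySem.Int.mod j 2 == 0 then
          PySem.List.pyRange START_X (START_X + SCAN_W) 1
        else
          PySem.List.pyRange (START_X + SCAN_W - 1) (START_X - 1) (-1)
      x_range.foldl (fun acc2 curr_x =>
        acc2 ++ [PySem.Int.toStr curr_x ++ "," ++ PySem.Int.toStr curr_y ++ ",0"]) acc)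
    []

-- ===== PORT B =====
-- one flat loop over all w*h cell indices; row j and column k recovered by divmod
def get_expected_trajectory_alt (SCAN_W : Int) (SCAN_H : Int) (STEP_UM : Int) (START_X : Int) (START_Y : Int) : List String :=
  let w := max SCAN_W 0
  let h := max SCAN_H 0
  (PySem.List.pyRange 0 (w * h) 1).foldl
    (fun out i =>
      let j := PySem.Int.floordiv i w
      let k := PySem.Int.mod i w
      let x := START_X + (if PySem.Int.mod j 2 == 0 then k else w - 1 - k)
      out ++ [PySem.Int.toStr x ++ "," ++ PySem.Int.toStr (START_Y + j * STEP_UM) ++ ",0"])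
    []

-- ===== PRECONDITION & SPEC =====
def Spec_get_expected_trajectory (SCAN_W : Int) (SCAN_H : Int) (STEP_UM : Int) (START_X : Int) (START_Y : Int) (out : List String) : Prop := out = get_expected_trajectory_alt SCAN_W SCAN_H STEP_UM START_X START_Y
instance (SCAN_W : Int) (SCAN_H : Int) (STEP_UM : Int) (START_X : Int) (START_Y : Int) (out : List String) : Decidable (Spec_get_expected_trajectory SCAN_W SCAN_H STEP_UM START_X START_Y out) := by unfold Spec_get_expected_trajectory; infer_instance

-- ===== CLAIM =====
def Claim_equal_get_expected_trajectory : Prop := ∀ (SCAN_W : Int) (SCAN_H : Int) (STEP_UM : Int) (START_X : Int) (START_Y : Int), Dom_get_expected_trajectory SCAN_W SCAN_H STEP_UM START_X START_Y → Spec_get_expected_trajectory SCAN_W SCAN_H STEP_UM START_X START_Y (get_expected_trajectory SCAN_W SCAN_H STEP_UM START_X START_Y)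

-- ===== LEMMAS AND PROOFS =====

def pvCell (Y ST X : Int) (j x : Int) : String :=
  PySem.Int.toStr (X + x) ++ "," ++ PySem.Int.toStr (Y + j * ST) ++ ",0"

def pvF (W Y ST X : Int) (i : Int) : String :=
  pvCell Y ST X (PySem.Int.floordiv i (max W 0))
    (if PySem.Int.mod (PySem.Int.floordiv i (max W 0)) 2 == 0 then PySem.Int.mod i (max W 0)
     else max W 0 - 1 - PySem.Int.mod i (max W 0))

def pvRow (W Y ST X : Int) (j : Int) : List String :=
  if PySem.Int.mod j 2 == 0 then
    (PySem.List.pyRange X (X + W) 1).map (fun x => PySem.Int.toStr x ++ "," ++ PySem.Int.toStr (Y + j * ST) ++ ",0")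
  else
    (PySem.List.pyRange (X + W - 1) (X - 1) (-1)).map (fun x => PySem.Int.toStr x ++ "," ++ PySem.Int.toStr (Y + j * ST) ++ ",0")

lemma pvRow_eq_block (W Y ST X : Int) (j : Int) :
    pvRow W Y ST X j
      = (PySem.List.pyRange (max W 0 * j) (max W 0 * j + max W 0) 1).map (pvF W Y ST X) := by
  by_cases hW : W ≤ 0
  · have hw : max W 0 = 0 := by omega
    rw [hw]
    simp [pvRow, PySem.List.pyRange_one_eq_nil (by omega : X + W ≤ X),
      PySem.List.pyRange_neg_one_eq_nil (by omega : X + W - 1 ≤ X - 1)]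
  · have hW' : 0 < W := by omega
    have hw : max W 0 = W := by omega
    rw [hw]
    have hm : PySem.Int.mod j 2 = j % 2 := PySem.Int.mod_eq_emod_of_pos (by norm_num)
    have hRHS : (PySem.List.pyRange (W * j) (W * j + W) 1).map (pvF W Y ST X)
        = (List.range W.toNat).map
            (fun k : Nat => pvCell Y ST X j
              (if PySem.Int.mod j 2 == 0 then ((k : Int)) else W - 1 - (k : Int))) := by
      rw [PySem.List.pyRange_one, List.map_map]
      have harg : W * j + W - W * j = W := by ring
      rw [harg]
      refine List.map_congr_left ?_
      intro k hk
      have hk' : (k : Int) < W := by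
        have := List.mem_range.mp hk
        omega
      have hk0 : (0 : Int) ≤ (k : Int) := Int.natCast_nonneg k
      have hfd : PySem.Int.floordiv (W * j + (k : Int)) W = j := by
        rw [PySem.Int.floordiv_eq_iff_of_pos hW']
        constructor
        · have := mul_comm j W; linarith
        · have h1 : (j + 1) * W = j * W + W := by ring
          have := mul_comm j W; linarith
      have hmod : PySem.Int.mod (W * j + (k : Int)) W = (k : Int) := by
        have h := PySem.Int.floordiv_mul_add_mod (W * j + (k : Int)) W
        rw [hfd] at h
        have := mul_comm j W; linarith
      simp only [Function.comp, pvF, hw, hfd, hmod]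
    rw [hRHS]
    by_cases hj : j % 2 = 0
    · have hj' : (PySem.Int.mod j 2 == 0) = true := by rw [hm]; simp [hj]
      simp only [pvRow, hj', if_true]
      rw [PySem.List.pyRange_one]
      have harg : X + W - X = W := by ring
      rw [harg, List.map_map]
      refine List.map_congr_left ?_
      intro k _
      simp [pvCell]
    · have hj' : (PySem.Int.mod j 2 == 0) = false := by rw [hm]; simp [hj]
      simp only [pvRow, hj', if_false]
      rw [PySem.List.pyRange_neg_one]
      have harg : X + W - 1 - (X - 1) = W := by ring
      rw [harg, List.map_map]
      refine List.map_congr_left ?_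
      intro k _
      have hx : X + W - 1 - (k : Int) = X + (W - 1 - (k : Int)) := by ring
      simp [Function.comp, pvCell, hx]

lemma pvMain (W Y ST X : Int) (n : Nat) :
    ((PySem.List.pyRange 0 (n : Int) 1).map (pvRow W Y ST X)).flatten
      = (PySem.List.pyRange 0 (max W 0 * n) 1).map (pvF W Y ST X) := by
  induction n with
  | zero => simp [PySem.List.pyRange_one_eq_nil (by omega : (0:Int) ≤ 0)]
  | succ n ih =>
    have hw0 : (0 : Int) ≤ max W 0 := le_max_right _ _
    have hcast : ((n + 1 : Nat) : Int) = (n : Int) + 1 := by push_cast; ring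
    rw [hcast, PySem.List.pyRange_one_succ_right (by positivity)]
    have hsplit : PySem.List.pyRange 0 (max W 0 * ((n : Int) + 1)) 1
        = PySem.List.pyRange 0 (max W 0 * (n : Int)) 1
          ++ PySem.List.pyRange (max W 0 * (n : Int)) (max W 0 * (n : Int) + max W 0) 1 := by
      have h1 : (0 : Int) ≤ max W 0 * (n : Int) := by positivity
      have h2 : max W 0 * (n : Int) ≤ max W 0 * (n : Int) + max W 0 := by linarith
      have h3 : max W 0 * ((n : Int) + 1) = max W 0 * (n : Int) + max W 0 := by ring
      rw [h3, PySem.List.pyRange_one_append _ _ _ h1 h2]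
    rw [hsplit, List.map_append, List.map_append, List.flatten_append, ih,
      List.map_singleton, List.flatten_cons, List.flatten_nil, List.append_nil,
      pvRow_eq_block]

-- ===== VERDICT =====
theorem get_expected_trajectory_spec : Claim_equal_get_expected_trajectory := by
  intro SCAN_W SCAN_H STEP_UM START_X START_Y _
  unfold Spec_get_expected_trajectory
  have hA : get_expected_trajectory SCAN_W SCAN_H STEP_UM START_X START_Y
      = ((PySem.List.pyRange 0 SCAN_H 1).map (pvRow SCAN_W START_Y STEP_UM START_X)).flatten := by
    unfold get_expected_trajectory
    simp only [PySem.List.foldl_append_singleton_eq_map, PySem.List.foldl_append_eq_flatMap,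
      List.flatMap_def, List.nil_append, pvRow, apply_ite (List.map (fun x =>
        PySem.Int.toStr x ++ "," ++ PySem.Int.toStr (START_Y + _ * STEP_UM) ++ ",0"))]
    rfl
  have hB : get_expected_trajectory_alt SCAN_W SCAN_H STEP_UM START_X START_Y
      = (PySem.List.pyRange 0 (max SCAN_W 0 * max SCAN_H 0) 1).map
          (pvF SCAN_W START_Y STEP_UM START_X) := by
    unfold get_expected_trajectory_alt
    simp only [PySem.List.foldl_append_singleton_eq_map, List.nil_append]
    rfl
  have hn : PySem.List.pyRange 0 SCAN_H 1 = PySem.List.pyRange 0 ((SCAN_H.toNat : Int)) 1 := by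
    rw [PySem.List.pyRange_one, PySem.List.pyRange_one]
    norm_num
    have h : SCAN_H.toNat = (max SCAN_H 0).toNat := by omega
    rw [h]
  have hmax : max SCAN_H 0 = (SCAN_H.toNat : Int) := (Int.ofNat_toNat _).symm
  rw [hA, hB, hn, hmax, pvMain]
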